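-- pv_equiv track=rewrite | github.com/prajapati-aditya/College_coding_assignment | 18-10-25/HashMap 2/maxFrequent_character.py | getMaxOccurringChar
-- ===== SOURCE A (Python) =====
-- def getMaxOccurringChar(s):
--     #code here
--     freq = {}
--     for char in s :
--         if char in freq :
--             freq[char] += 1
--         else :
--             freq[char] = 1
--     res  = " "
--     a = -1
--     for char , num in freq.items() :
--         if num > a or (num == a and char < res ) :
--             res = char
--             a = num
--     return res
-- ===== SOURCE B (Python) =====
-- def getMaxOccurringChar(s):
--     # Sort the characters so equal ones are adjacent, then scan the runs,
--     # keeping the first (i.e. lexicographically smallest) run of maximal length.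
--     t = sorted(s)
--     best, bn = " ", 0
--     i, n = 0, len(t)
--     while i < n:
--         j = i
--         while j < n and t[j] == t[i]:
--             j += 1
--         if j - i > bn:
--             best, bn = t[i], j - i
--         i = j
--     return best
-- ===== Notes on version B (the rewrite author's own statement) =====
-- stated objective: alternative
-- what changed: Replaces A's hash-map frequency count plus interleaved max/tie-break scan with a sort-then-run-scan: sort the characters, walk the adjacent equal runs with two indices, and keep the first run of strictly maximal length (sorted order makes the first maximal run the lexicographically smallest).
import Mathlib
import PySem

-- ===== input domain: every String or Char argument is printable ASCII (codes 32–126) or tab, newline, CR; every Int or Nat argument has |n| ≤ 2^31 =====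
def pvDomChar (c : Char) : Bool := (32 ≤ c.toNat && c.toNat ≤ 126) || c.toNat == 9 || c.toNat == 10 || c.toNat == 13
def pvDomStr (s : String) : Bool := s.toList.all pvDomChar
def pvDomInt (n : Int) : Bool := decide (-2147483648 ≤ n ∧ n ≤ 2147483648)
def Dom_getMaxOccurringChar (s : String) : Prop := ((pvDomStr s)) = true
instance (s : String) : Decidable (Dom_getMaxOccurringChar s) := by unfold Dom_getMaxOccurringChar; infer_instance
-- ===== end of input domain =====

-- B replaces A's hash-map counting plus interleaved max/tie-break scan by sorting the characters
-- and scanning the adjacent equal runs, keeping the first run of strictly maximal length;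
-- objective: alternative algorithm (no frequency dictionary at all).

-- ===== PORT A =====
-- step of A's frequency-building loop: 'if char in freq: freq[char] += 1 else: freq[char] = 1'
def pvFreqStepA (d : PySem.Dict Char Int) (ch : Char) : PySem.Dict Char Int :=
  if d.contains ch then d.modify ch 0 (· + 1) else d.insert ch 1

-- step of A's selection loop: 'if num > a or (num == a and char < res): res = char; a = num'
def pvSelStepA (st : String × Int) (p : Char × Int) : String × Int :=
  if p.2 > st.2 ∨ (p.2 = st.2 ∧ String.singleton p.1 < st.1) then (String.singleton p.1, p.2) else st

def getMaxOccurringChar (s : String) : String :=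
  let freq : PySem.Dict Char Int := s.toList.foldl pvFreqStepA PySem.Dict.empty
  let st := freq.items.foldl pvSelStepA (" ", -1)
  st.1

-- ===== PORT B =====
-- the outer while loop of Source B: at index i, the inner while advances j over the run of
-- characters equal to t[i]; here the run is the takeWhile/dropWhile split of the same list
def pvRunScanB : List Char → String → Int → String
  | [], best, _ => best
  | c :: rest, best, bn =>
    let run := rest.takeWhile (fun x => x == c)
    let tail := rest.dropWhile (fun x => x == c)
    let cnt : Int := (run.length : Int) + 1
    if cnt > bn then pvRunScanB tail (String.singleton c) cnt
    else pvRunScanB tail best bn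
termination_by l => l.length
decreasing_by
  all_goals
    simp only [List.length_cons]
    exact Nat.lt_succ_of_le (List.length_dropWhile_le _ _)

def getMaxOccurringChar_alt (s : String) : String :=
  pvRunScanB (PySem.List.sorted s.toList (fun c => c) false) " " 0

-- ===== PRECONDITION & SPEC =====
def Spec_getMaxOccurringChar (s : String) (out : String) : Prop := out = getMaxOccurringChar_alt s
instance (s : String) (out : String) : Decidable (Spec_getMaxOccurringChar s out) := by unfold Spec_getMaxOccurringChar; infer_instance

-- ===== CLAIM (what is proved, stated in full; the proofs are below) =====
def Claim_equal_getMaxOccurringChar : Prop := ∀ (s : String), Dom_getMaxOccurringChar s → Spec_getMaxOccurringChar s (getMaxOccurringChar s)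

-- ===== LEMMAS AND PROOFS =====

-- ---- generic foldl max / foldl min facts ----
theorem pv_foldl_max_init_le (a : Int) (l : List Int) : a ≤ l.foldl max a := by
  induction l generalizing a with
  | nil => exact le_refl a
  | cons x t ih => exact le_trans (le_max_left a x) (ih (max a x))

theorem pv_foldl_max_mem_le (a : Int) (l : List Int) : ∀ x ∈ l, x ≤ l.foldl max a := by
  induction l generalizing a with
  | nil => intro x hx; cases hx
  | cons y t ih =>
    intro x hx
    rcases List.mem_cons.mp hx with h | h
    · subst h; exact le_trans (le_max_right a x) (pv_foldl_max_init_le _ _)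
    · exact ih (max a y) x h

theorem pv_foldl_max_cases (a : Int) (l : List Int) :
    l.foldl max a = a ∨ l.foldl max a ∈ l := by
  induction l generalizing a with
  | nil => exact Or.inl rfl
  | cons y t ih =>
    rcases ih (max a y) with h | h
    · rcases max_choice a y with hc | hc
      · left; simpa [List.foldl_cons, hc] using h
      · right; simp only [List.foldl_cons]; rw [h, hc]; exact List.mem_cons_self
    · right; exact List.mem_cons_of_mem _ h

theorem pv_foldl_min_init_le {α : Type} [LinearOrder α] (a : α) (l : List α) :
    l.foldl min a ≤ a := by
  induction l generalizing a with
  | nil => exact le_refl a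
  | cons x t ih => exact le_trans (ih (min a x)) (min_le_left a x)

theorem pv_foldl_min_le_mem {α : Type} [LinearOrder α] (a : α) (l : List α) :
    ∀ x ∈ l, l.foldl min a ≤ x := by
  induction l generalizing a with
  | nil => intro x hx; cases hx
  | cons y t ih =>
    intro x hx
    rcases List.mem_cons.mp hx with h | h
    · subst h
      simp only [List.foldl_cons]
      exact le_trans (pv_foldl_min_init_le (min a x) t) (min_le_right a x)
    · exact ih (min a y) x h

theorem pv_foldl_min_cases {α : Type} [LinearOrder α] (a : α) (l : List α) :
    l.foldl min a = a ∨ l.foldl min a ∈ l := by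
  induction l generalizing a with
  | nil => exact Or.inl rfl
  | cons y t ih =>
    rcases ih (min a y) with h | h
    · rcases min_choice a y with hc | hc
      · left; simpa [List.foldl_cons, hc] using h
      · right; simp only [List.foldl_cons]; rw [h, hc]; exact List.mem_cons_self
    · right; exact List.mem_cons_of_mem _ h

-- ---- A-side lemmas (unchanged analysis of A's two loops) ----

-- the Char-level shadow of A's selection step (res kept as a Char instead of a singleton String)
def pvSelStepC (st : Char × Int) (p : Char × Int) : Char × Int :=
  if p.2 > st.2 ∨ (p.2 = st.2 ∧ p.1 < st.1) then p else st

theorem pv_singleton_lt_iff (a b : Char) :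
    String.singleton a < String.singleton b ↔ a < b := by
  rw [String.lt_iff_toList_lt]
  simp only [String.toList_singleton]
  constructor
  · intro h
    cases h with
    | rel h => exact h
    | cons h => cases h
  · intro h; exact List.Lex.rel h

theorem pv_selA_eq_selC (ps : List (Char × Int)) :
    ∀ (c : Char) (n : Int),
      List.foldl pvSelStepA (String.singleton c, n) ps
        = (String.singleton (List.foldl pvSelStepC (c, n) ps).1,
           (List.foldl pvSelStepC (c, n) ps).2) := by
  induction ps with
  | nil => intro c n; rfl
  | cons p tl ih =>
    intro c n
    simp only [List.foldl_cons]
    have hstep : pvSelStepA (String.singleton c, n) p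
        = (String.singleton (pvSelStepC (c, n) p).1, (pvSelStepC (c, n) p).2) := by
      unfold pvSelStepA pvSelStepC
      by_cases h : p.2 > n ∨ (p.2 = n ∧ p.1 < c)
      · rw [if_pos, if_pos h]
        rcases h with h | ⟨h1, h2⟩
        · exact Or.inl h
        · exact Or.inr ⟨h1, (pv_singleton_lt_iff _ _).mpr h2⟩
      · rw [if_neg, if_neg h]
        intro hc; apply h
        rcases hc with hc | ⟨h1, h2⟩
        · exact Or.inl hc
        · exact Or.inr ⟨h1, (pv_singleton_lt_iff _ _).mp h2⟩
    rw [hstep]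
    exact ih (pvSelStepC (c, n) p).1 (pvSelStepC (c, n) p).2

-- A's selection fold computes (min char among max-count pairs, max count)
theorem pv_selC_spec (ps : List (Char × Int)) :
    ∀ (c : Char) (n : Int),
      ∃ h t,
        (((c, n) :: ps).filter (fun p => p.2 == List.foldl max n (ps.map Prod.snd))).map Prod.fst
          = h :: t
        ∧ List.foldl pvSelStepC (c, n) ps
          = (List.foldl min h t, List.foldl max n (ps.map Prod.snd)) := by
  induction ps with
  | nil =>
    intro c n
    exact ⟨c, [], by simp, by simp⟩
  | cons p tl ih =>
    intro c n
    obtain ⟨c', n'⟩ := p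
    have hsnd : (pvSelStepC (c, n) (c', n')).2 = max n n' := by
      unfold pvSelStepC
      by_cases h : n' > n ∨ (n' = n ∧ c' < c)
      · rw [if_pos h]
        rcases h with h | ⟨h1, _⟩ <;> simp <;> omega
      · rw [if_neg h]
        have hle : ¬ n' > n := fun hgt => h (Or.inl hgt)
        simp; omega
    have hM : List.foldl max n (((c', n') :: tl).map Prod.snd)
        = List.foldl max (pvSelStepC (c, n) (c', n')).2 (tl.map Prod.snd) := by
      rw [hsnd]; rfl
    obtain ⟨h, t, hF, hfold⟩ := ih (pvSelStepC (c, n) (c', n')).1 (pvSelStepC (c, n) (c', n')).2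
    set M := List.foldl max (pvSelStepC (c, n) (c', n')).2 (tl.map Prod.snd) with hMdef
    have hMge : (pvSelStepC (c, n) (c', n')).2 ≤ M := pv_foldl_max_init_le _ _
    simp only [List.foldl_cons, hM]
    by_cases hn : n = M <;> by_cases hn' : n' = M
    · -- both head counts hit the max
      have hcc : pvSelStepC (c, n) (c', n') = (min c c', M) := by
        unfold pvSelStepC
        by_cases hlt : c' < c
        · rw [if_pos (Or.inr ⟨by omega, hlt⟩)]
          simp [min_eq_right (le_of_lt hlt), hn']
        · rw [if_neg (by rintro (hc | ⟨-, hc⟩) <;> first | omega | exact hlt hc)]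
          simp [min_eq_left (le_of_not_gt hlt), hn]
      rw [hcc] at hF hfold
      have hR : ((( (min c c', M) :: tl).filter (fun p => p.2 == M)).map Prod.fst)
          = (min c c') :: ((tl.filter (fun p => p.2 == M)).map Prod.fst) := by
        simp
      rw [hR] at hF
      obtain ⟨hh, ht⟩ := List.cons.inj hF
      refine ⟨c, c' :: ((tl.filter (fun p => p.2 == M)).map Prod.fst), ?_, ?_⟩
      · simp [hn, hn']
      · rw [hcc, hfold, ← hh, ← ht]
        simp [List.foldl_cons]
    · -- n = M, n' < M : step keeps (c, n)
      have hlt : n' < M := lt_of_le_of_ne (by rw [hsnd] at hMge; omega) hn'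
      have hcc : pvSelStepC (c, n) (c', n') = (c, n) := by
        unfold pvSelStepC
        rw [if_neg]
        intro hc; rcases hc with hc | ⟨hc, _⟩ <;> omega
      rw [hcc] at hF hfold
      have hF' : (((c, n) :: (c', n') :: tl).filter (fun p => p.2 == M)).map Prod.fst
          = (((c, n) :: tl).filter (fun p => p.2 == M)).map Prod.fst := by
        simp [hn, (by omega : ¬n' = M)]
      rw [hF', hcc]
      exact ⟨h, t, hF, hfold⟩
    · -- n < M, n' = M : step takes (c', n')
      have hlt : n < M := lt_of_le_of_ne (by rw [hsnd] at hMge; omega) hn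
      have hcc : pvSelStepC (c, n) (c', n') = (c', n') := by
        unfold pvSelStepC
        rw [if_pos (Or.inl (by omega))]
      rw [hcc] at hF hfold
      have hF' : (((c, n) :: (c', n') :: tl).filter (fun p => p.2 == M)).map Prod.fst
          = (((c', n') :: tl).filter (fun p => p.2 == M)).map Prod.fst := by
        simp [List.filter_cons, (by omega : ¬ n = M)]
      rw [hF', hcc]
      exact ⟨h, t, hF, hfold⟩
    · -- neither head count hits the max
      have hne : ¬ (pvSelStepC (c, n) (c', n')).2 = M := by
        rw [hsnd]; rcases max_choice n n' with hc | hc <;> rw [hc] <;> omega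
      have hF' : (((c, n) :: (c', n') :: tl).filter (fun p => p.2 == M)).map Prod.fst
          = ((((pvSelStepC (c, n) (c', n')).1, (pvSelStepC (c, n) (c', n')).2) :: tl).filter
              (fun p => p.2 == M)).map Prod.fst := by
        simp [hn, hn', hne]
      rw [hF']
      exact ⟨h, t, by simpa using hF, hfold⟩

theorem pv_modify_absent (d : PySem.Dict Char Int) (c : Char) (h : d.contains c = false) :
    d.modify c 0 (· + 1) = d.insert c 1 := by
  have h2 : d.get? c = none := by
    have := PySem.Dict.contains_eq_isSome_get? (d := d) (k := c)
    rw [h] at this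
    exact Option.not_isSome_iff_eq_none.mp (by simp [← this])
  simp [PySem.Dict.modify, PySem.Dict.getD, h2]

theorem pv_freqA_eq_counter (l : List Char) :
    l.foldl pvFreqStepA PySem.Dict.empty = PySem.Dict.counter l := by
  rw [PySem.Dict.counter_eq_foldl]
  apply PySem.List.foldl_congr_mem
  intro d c _
  unfold pvFreqStepA
  by_cases h : d.contains c
  · rw [if_pos h]
  · rw [if_neg (by simp [h]), pv_modify_absent d c (by simpa using h)]

-- ---- B-side lemmas: the run scan on a sorted list ----

-- the run decomposition of a list, with the length of each run
def pvRuns : List Char → List (Char × Int)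
  | [] => []
  | c :: rest =>
    (c, ((rest.takeWhile (fun x => x == c)).length : Int) + 1)
      :: pvRuns (rest.dropWhile (fun x => x == c))
termination_by l => l.length
decreasing_by
  simp only [List.length_cons]
  exact Nat.lt_succ_of_le (List.length_dropWhile_le _ _)

-- the run scan, abstracted to the run list
def pvG : List (Char × Int) → String → Int → String
  | [], best, _ => best
  | p :: rs, best, bn =>
    if p.2 > bn then pvG rs (String.singleton p.1) p.2
    else pvG rs best bn

theorem pv_runScan_eq_G (l : List Char) :
    ∀ best bn, pvRunScanB l best bn = pvG (pvRuns l) best bn := by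
  induction l using pvRuns.induct with
  | case1 => intro best bn; rw [pvRunScanB, pvRuns]; rfl
  | case2 c rest ih =>
    intro best bn
    rw [pvRunScanB, pvRuns]
    simp only [pvG]
    split_ifs with h
    · exact ih _ _
    · exact ih _ _

theorem pv_G_no (rs : List (Char × Int)) :
    ∀ best bn, (∀ p ∈ rs, p.2 ≤ bn) → pvG rs best bn = best := by
  induction rs with
  | nil => intro best bn _; rfl
  | cons p tl ih =>
    intro best bn hle
    rw [pvG, if_neg (by have := hle p List.mem_cons_self; omega)]
    exact ih best bn (fun q hq => hle q (List.mem_cons_of_mem _ hq))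

-- if some run beats bn, the result is the FIRST run whose length is the overall max
theorem pv_G_yes (rs : List (Char × Int)) :
    ∀ best bn, bn < List.foldl max bn (rs.map Prod.snd) →
      ∃ h t, (rs.filter (fun p => p.2 == List.foldl max bn (rs.map Prod.snd))).map Prod.fst
          = h :: t
        ∧ pvG rs best bn = String.singleton h := by
  induction rs with
  | nil => intro best bn hlt; simp at hlt
  | cons p tl ih =>
    intro best bn hlt
    obtain ⟨c, k⟩ := p
    simp only [List.map_cons, List.foldl_cons] at hlt ⊢
    by_cases hk : k > bn
    · -- step updates to (singleton c, k)
      have hmax : max bn k = k := max_eq_right (le_of_lt hk)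
      rw [hmax] at hlt ⊢
      rw [pvG, if_pos hk]
      by_cases hall : ∀ q ∈ tl, q.2 ≤ k
      · -- k is the overall max: result is c, and (c,k) heads the filter
        have hM : List.foldl max k (tl.map Prod.snd) = k := by
          rcases pv_foldl_max_cases k (tl.map Prod.snd) with h | h
          · exact h
          · obtain ⟨q, hq, hq2⟩ := List.mem_map.mp h
            have := hall q hq
            have := pv_foldl_max_init_le k (tl.map Prod.snd)
            omega
        rw [hM]
        refine ⟨c, ((tl.filter (fun p => p.2 == k)).map Prod.fst), ?_, ?_⟩
        · rw [List.filter_cons_of_pos (by simp)]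
          simp
        · exact pv_G_no tl _ k hall
      · push_neg at hall
        obtain ⟨q, hq, hq2⟩ := hall
        have hM : k < List.foldl max k (tl.map Prod.snd) := by
          have := pv_foldl_max_mem_le k (tl.map Prod.snd) q.2
            (List.mem_map.mpr ⟨q, hq, rfl⟩)
          omega
        obtain ⟨h, t, hF, hres⟩ := ih (String.singleton c) k hM
        refine ⟨h, t, ?_, hres⟩
        rw [List.filter_cons_of_neg (by simp; omega)]
        exact hF
    · -- step keeps (best, bn); (c,k) cannot reach the max
      have hmax : max bn k = bn := max_eq_left (by omega)
      rw [hmax] at hlt ⊢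
      rw [pvG, if_neg hk]
      obtain ⟨h, t, hF, hres⟩ := ih best bn hlt
      refine ⟨h, t, ?_, hres⟩
      rw [List.filter_cons_of_neg (by simp; omega)]
      exact hF

-- structure of the run list of a sorted list: distinct strictly increasing chars with their counts
theorem pv_runs_spec (l : List Char) (hs : l.Pairwise (· ≤ ·)) :
    (∀ p ∈ pvRuns l, p.2 = (l.count p.1 : Int))
    ∧ (∀ c : Char, c ∈ (pvRuns l).map Prod.fst ↔ c ∈ l)
    ∧ ((pvRuns l).map Prod.fst).Pairwise (· < ·) := by
  induction l using pvRuns.induct with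
  | case1 => refine ⟨?_, ?_, ?_⟩ <;> simp [pvRuns]
  | case2 c rest ih =>
    set run := rest.takeWhile (fun x => x == c) with hrun
    set tail := rest.dropWhile (fun x => x == c) with htail
    have hsplit : run ++ tail = rest := List.takeWhile_append_dropWhile
    have hrest_le : ∀ x ∈ rest, c ≤ x := by
      intro x hx; exact (List.pairwise_cons.mp hs).1 x hx
    have hstail : tail.Pairwise (· ≤ ·) := by
      have : rest.Pairwise (· ≤ ·) := (List.pairwise_cons.mp hs).2
      exact this.sublist (List.dropWhile_sublist _)
    have hrun_eq : ∀ x ∈ run, x = c := by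
      intro x hx
      have := List.mem_takeWhile_imp hx
      simpa using this
    have htail_gt : ∀ x ∈ tail, c < x := by
      intro x hx
      cases htl : tail with
      | nil => rw [htl] at hx; cases hx
      | cons d tail' =>
        have hd_ne : ¬ (d == c) = true := by
          have := List.head?_dropWhile_not (fun x => x == c) rest
          rw [← htail, htl] at this
          simpa using this
        have hd_mem : d ∈ rest := (List.dropWhile_sublist _).mem (by rw [← htail, htl]; exact List.mem_cons_self)
        have hcd : c < d := lt_of_le_of_ne (hrest_le d hd_mem) (by simpa using (Ne.symm (by simpa using hd_ne)))
        rw [htl] at hx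
        rcases List.mem_cons.mp hx with h | h
        · exact h ▸ hcd
        · have hdx : d ≤ x := by
            rw [htl] at hstail
            exact (List.pairwise_cons.mp hstail).1 x h
          exact lt_of_lt_of_le hcd hdx
    have hc_notin_tail : c ∉ tail := fun h => lt_irrefl c (htail_gt c h)
    have hcount_run : run.count c = run.length := by
      rw [List.count_eq_length]
      intro x hx; exact (by simpa using (hrun_eq x hx).symm)
    have hcount_c : (c :: rest).count c = run.length + 1 := by
      rw [List.count_cons_self, ← hsplit, List.count_append, hcount_run,
          List.count_eq_zero.mpr hc_notin_tail]
    have hcount_other : ∀ x, x ≠ c → (c :: rest).count x = tail.count x := by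
      intro x hx
      have h1 : (c :: rest).count x = rest.count x := by
        simp only [List.count_cons]
        have h2 : ¬ c = x := fun h => hx h.symm
        simp [h2]
      rw [h1, ← hsplit, List.count_append,
          List.count_eq_zero.mpr (fun hmem => hx (hrun_eq x hmem)), Nat.zero_add]
    obtain ⟨ih1, ih2, ih3⟩ := ih hstail
    rw [pvRuns, ← hrun, ← htail]
    refine ⟨?_, ?_, ?_⟩
    · intro p hp
      rcases List.mem_cons.mp hp with h | h
      · subst h; simp only []; rw [hcount_c]; push_cast; ring
      · have hp1 : p.1 ∈ tail := (ih2 p.1).mp (List.mem_map.mpr ⟨p, h, rfl⟩)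
        have hne : p.1 ≠ c := fun he => hc_notin_tail (he ▸ hp1)
        rw [ih1 p h, hcount_other p.1 hne]
    · intro x
      simp only [List.map_cons, List.mem_cons, ih2]
      constructor
      · rintro (h | h)
        · exact Or.inl h
        · right; rw [← hsplit]; exact List.mem_append_right _ h
      · rintro (h | h)
        · exact Or.inl h
        · rw [← hsplit] at h
          rcases List.mem_append.mp h with h | h
          · exact Or.inl (hrun_eq x h)
          · exact Or.inr h
    · simp only [List.map_cons]
      rw [List.pairwise_cons]
      refine ⟨?_, ih3⟩
      intro x hx
      exact htail_gt x ((ih2 x).mp hx)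

-- ---- main equivalence ----
theorem getMaxOccurringChar_eq_alt (s : String) :
    getMaxOccurringChar s = getMaxOccurringChar_alt s := by
  cases hl : s.toList with
  | nil =>
    unfold getMaxOccurringChar getMaxOccurringChar_alt
    rw [hl]
    have hsn : PySem.List.sorted ([] : List Char) (fun c => c) false = [] := by
      simp [PySem.List.sorted_eq_nil_iff]
    rw [hsn, pvRunScanB]
    rfl
  | cons a tl0 =>
    -- the sorted list and its basic facts
    set t := PySem.List.sorted s.toList (fun c => c) false with ht
    have htperm : t.Perm s.toList := PySem.List.sorted_perm _ _ _
    have htsorted : t.Pairwise (· ≤ ·) := by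
      have := PySem.List.sorted_pairwise (xs := s.toList) (key := fun c => c)
      simpa using this
    obtain ⟨r1, r2, r3⟩ := pv_runs_spec t htsorted
    -- common key list facts
    have hKne : PySem.Set.ofList s.toList ≠ [] := by
      intro h0
      have hm : a ∈ PySem.Set.ofList s.toList :=
        (PySem.Set.mem_ofList _ _).mpr (by rw [hl]; exact List.mem_cons_self)
      rw [h0] at hm; cases hm
    obtain ⟨k0, K', hK⟩ := List.exists_cons_of_ne_nil hKne
    -- A's result via the old analysis
    unfold getMaxOccurringChar getMaxOccurringChar_alt
    rw [pv_freqA_eq_counter]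
    simp only [PySem.Dict.items_counter, hK, List.map_cons, List.foldl_cons]
    have h0 : pvSelStepA (" ", -1) (k0, (s.toList.count k0 : Int))
        = (String.singleton k0, (s.toList.count k0 : Int)) := by
      unfold pvSelStepA
      rw [if_pos (Or.inl (by omega))]
    rw [h0, pv_selA_eq_selC]
    obtain ⟨h, t', hF, hfold⟩ :=
      pv_selC_spec (K'.map fun k => (k, (s.toList.count k : Int))) k0 (s.toList.count k0)
    simp only [List.map_map] at hF hfold
    rw [hfold]
    -- names for the two pair lists and the two maxima
    set P : List (Char × Int) := (PySem.Set.ofList s.toList).map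
      (fun k => (k, (s.toList.count k : Int))) with hP
    have hPK : P = (k0, (s.toList.count k0 : Int))
        :: K'.map (fun k => (k, (s.toList.count k : Int))) := by
      rw [hP, hK, List.map_cons]
    set R := pvRuns t with hR
    set MA := List.foldl max ((s.toList.count k0 : Int))
      ((K'.map fun k => ((s.toList.count k : Int))) ) with hMA
    -- pvRuns t = (its own fst list) paired with counts in s.toList
    have hRcount : ∀ p ∈ R, p.2 = (s.toList.count p.1 : Int) := by
      intro p hp
      rw [r1 p hp]
      norm_cast
      exact htperm.count_eq p.1
    have hReq : R = (R.map Prod.fst).map (fun k => (k, (s.toList.count k : Int))) := by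
      rw [List.map_map]
      conv_lhs => rw [← List.map_id R]
      apply List.map_congr_left
      intro p hp
      have h2 := hRcount p hp
      simp only [id_eq, Function.comp_apply]
      exact Prod.ext rfl h2
    -- the key lists are permutations of each other
    have hndR : (R.map Prod.fst).Nodup := List.Pairwise.imp (fun h => ne_of_lt h) r3
    have hfstperm : (R.map Prod.fst).Perm (PySem.Set.ofList s.toList) := by
      apply (List.perm_ext_iff_of_nodup hndR (PySem.Set.nodup_ofList _)).mpr
      intro x
      rw [r2, PySem.Set.mem_ofList]
      exact ⟨fun hx => htperm.mem_iff.mp hx, fun hx => htperm.mem_iff.mpr hx⟩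
    have hRP : R.Perm P := by
      rw [hReq, hP]
      exact hfstperm.map _
    -- the two maxima agree
    have hMAspec : (∀ x ∈ P.map Prod.snd, x ≤ MA) ∧ MA ∈ P.map Prod.snd := by
      constructor
      · intro x hx
        rw [hPK] at hx
        simp only [List.map_cons, List.map_map, List.mem_cons] at hx
        rcases hx with h | h
        · rw [h, hMA]
          exact pv_foldl_max_init_le _ _
        · rw [hMA]
          apply pv_foldl_max_mem_le
          simpa [List.map_map] using h
      · rcases pv_foldl_max_cases ((s.toList.count k0 : Int))
          ((K'.map fun k => ((s.toList.count k : Int)))) with hc | hc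
        · rw [hPK]; rw [hMA, hc]; simp
        · rw [hPK]
          simp only [List.map_cons, List.map_map, List.mem_cons]
          right
          rw [hMA]
          simpa [List.map_map] using hc
    set MB := List.foldl max 0 (R.map Prod.snd) with hMB
    have hMBspec : (∀ x ∈ R.map Prod.snd, x ≤ MB) ∧ (MB = 0 ∨ MB ∈ R.map Prod.snd) := by
      exact ⟨fun x hx => pv_foldl_max_mem_le _ _ x hx, pv_foldl_max_cases _ _⟩
    have hsndperm : (R.map Prod.snd).Perm (P.map Prod.snd) := hRP.map _
    have hMApos : 1 ≤ MA := by
      have hk0 : (s.toList.count k0 : Int) ∈ P.map Prod.snd := by rw [hPK]; simp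
      have h1 : 1 ≤ (s.toList.count k0 : Int) := by
        have : k0 ∈ s.toList := (PySem.Set.mem_ofList _ _).mp (by rw [hK]; exact List.mem_cons_self)
        have := List.count_pos_iff.mpr this
        omega
      exact le_trans h1 (hMAspec.1 _ hk0)
    have hMeq : MA = MB := by
      apply le_antisymm
      · have : MA ∈ R.map Prod.snd := hsndperm.mem_iff.mpr hMAspec.2
        exact hMBspec.1 _ this
      · rcases hMBspec.2 with h | h
        · omega
        · exact hMAspec.1 _ (hsndperm.mem_iff.mp h)
    -- B's result via the run-scan analysis
    have hMBpos : 0 < MB := by omega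
    rw [pv_runScan_eq_G]
    obtain ⟨hb, tb, hFB, hresB⟩ := pv_G_yes R " " 0 (by rw [← hMB]; omega)
    rw [hresB]
    rw [← hMB] at hFB
    -- both are the minimum of the same (permuted) filtered key list
    have hMAeq : List.foldl max ((s.toList.count k0:Int))
        (List.map (fun k => (s.toList.count k : Int)) K') = MA := rfl
    have hfilterperm : ((R.filter (fun p => p.2 == MB)).map Prod.fst).Perm
        ((P.filter (fun p => p.2 == MA)).map Prod.fst) := by
      rw [hMeq]
      exact (hRP.filter _).map _
    have hFA : (P.filter (fun p => p.2 == MA)).map Prod.fst = h :: t' := by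
      rw [hPK]
      simpa [hMAeq, List.filter_map, List.map_map, Function.comp_def] using hF
    rw [hFB, hFA] at hfilterperm
    -- hb is minimal among hb :: tb (sorted strictly increasing keys)
    have hbmin : ∀ x ∈ hb :: tb, hb ≤ x := by
      have hsub : ((R.filter (fun p => p.2 == MB)).map Prod.fst).Sublist (R.map Prod.fst) := by
        exact List.Sublist.map _ List.filter_sublist
      have : (hb :: tb).Pairwise (· < ·) := by
        rw [← hFB]; exact r3.sublist hsub
      intro x hx
      rcases List.mem_cons.mp hx with h | h
      · exact le_of_eq h.symm
      · exact le_of_lt ((List.pairwise_cons.mp this).1 x h)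
    -- foldl min h t' is minimal among h :: t' and a member of it
    have hfmem : List.foldl min h t' ∈ h :: t' := by
      rcases pv_foldl_min_cases h t' with hc | hc
      · rw [hc]; exact List.mem_cons_self
      · exact List.mem_cons_of_mem _ hc
    have hfmin : ∀ x ∈ h :: t', List.foldl min h t' ≤ x := by
      intro x hx
      rcases List.mem_cons.mp hx with hx | hx
      · rw [hx]; exact pv_foldl_min_init_le _ _
      · exact pv_foldl_min_le_mem _ _ x hx
    have hfinal : List.foldl min h t' = hb := by
      apply le_antisymm
      · exact hfmin hb (hfilterperm.mem_iff.mp List.mem_cons_self)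
      · exact hbmin _ (hfilterperm.mem_iff.mpr hfmem)
    rw [hfinal]

-- ===== VERDICT (by name: the statement is the Claim_ definition above) =====
theorem getMaxOccurringChar_spec : Claim_equal_getMaxOccurringChar := by
  intro s _
  unfold Spec_getMaxOccurringChar
  exact getMaxOccurringChar_eq_alt s
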